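-- pv_equiv track=rewrite | github.com/kaushikreddyxyz/probe-generalization | utils.py | extract_mc_answer
-- ===== SOURCE A (Python) =====
-- def extract_mc_answer(text, options: str = "ABCDE"):
--     start_tag = "<start_of_turn>model"
--
--     start_index = text.find(start_tag)
--     if start_index == -1:
--         return None
--
--     # Move past the start tag
--     start_index += len(start_tag)
--
--     # Look for the first capital letter A-E after the start tag
--     for i in range(start_index, len(text)):
--         if text[i] in options:
--             return text[i]
--
--     # No capital letter A-E found
--     return None
-- ===== SOURCE B (Python) =====
-- def extract_mc_answer(text, options: str = "ABCDE"):
--     start_tag = "<start_of_turn>model"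
--     start = text.find(start_tag)
--     if start == -1:
--         return None
--     start += len(start_tag)
--     best = None
--     best_i = len(text)
--     for c in options:
--         i = text.find(c, start)
--         if i != -1 and i < best_i:
--             best_i = i
--             best = c
--     return best
-- ===== Notes on version B (the rewrite author's own statement) =====
-- stated objective: alternative
-- what changed: Instead of scanning the text character by character testing membership in options, B loops over the option letters, asks the string engine for each letter's first occurrence after the tag with text.find(c, start), and keeps the letter with the minimal index.
import Mathlib
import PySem

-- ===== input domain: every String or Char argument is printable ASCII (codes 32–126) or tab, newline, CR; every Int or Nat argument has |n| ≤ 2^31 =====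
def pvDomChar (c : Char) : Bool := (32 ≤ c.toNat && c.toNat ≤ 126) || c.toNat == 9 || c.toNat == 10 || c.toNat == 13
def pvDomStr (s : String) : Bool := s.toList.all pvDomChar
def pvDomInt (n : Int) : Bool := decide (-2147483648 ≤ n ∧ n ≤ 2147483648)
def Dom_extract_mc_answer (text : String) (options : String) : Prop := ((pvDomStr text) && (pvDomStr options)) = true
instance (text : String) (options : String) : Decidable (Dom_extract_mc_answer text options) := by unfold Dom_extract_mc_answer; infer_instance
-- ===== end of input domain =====

-- B loops over the option letters with one substring search each (text.find(c, start)) and keeps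
-- the letter of minimal index, instead of A's character-by-character scan of the text; same cost class.

-- ===== PORT A =====
-- for i in range(start_index, len(text)): if text[i] in options: return text[i]
def extractLoopA (text : String) (options : String) : List Int → Option String
  | [] => none
  | i :: rest =>
    match PySem.Str.pyGet? text i with
    | none => none   -- unreachable: every i produced by range(start, len(text)) is a valid index
    | some c =>
      if PySem.Str.isIn (String.ofList [c]) options then some (String.ofList [c])
      else extractLoopA text options rest

def extract_mc_answer (text : String) (options : String) : Option String :=
  let start_tag := "<start_of_turn>model"
  let start_index := PySem.Str.find text start_tag
  if start_index = -1 then none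
  else
    let start_index := start_index + PySem.Str.len start_tag
    extractLoopA text options (PySem.List.pyRange start_index (PySem.Str.len text))

-- ===== PORT B =====
-- for c in options: i = text.find(c, start); if i != -1 and i < best_i: best_i, best = i, c
def bLoop (text : String) (start : Int) : List Char → Option String × Int → Option String × Int
  | [], acc => acc
  | c :: rest, (best, best_i) =>
    let i := PySem.Str.findFrom text (String.ofList [c]) start
    if i ≠ -1 ∧ i < best_i then bLoop text start rest (some (String.ofList [c]), i)
    else bLoop text start rest (best, best_i)

def extract_mc_answer_alt (text : String) (options : String) : Option String :=
  let start_tag := "<start_of_turn>model"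
  let start := PySem.Str.find text start_tag
  if start = -1 then none
  else
    let start := start + PySem.Str.len start_tag
    (bLoop text start options.toList (none, PySem.Str.len text)).1

-- ===== PRECONDITION & SPEC =====
def Spec_extract_mc_answer (text : String) (options : String) (out : Option String) : Prop := out = extract_mc_answer_alt text options
instance (text : String) (options : String) (out : Option String) : Decidable (Spec_extract_mc_answer text options out) := by unfold Spec_extract_mc_answer; infer_instance

-- ===== CLAIM (what is proved, stated in full; the proofs are below) =====
def Claim_equal_extract_mc_answer : Prop := ∀ (text : String) (options : String), Dom_extract_mc_answer text options → Spec_extract_mc_answer text options (extract_mc_answer text options)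

-- ===== LEMMAS AND PROOFS =====

def firstHit (os : List Char) : List Char → Option (Nat × Char)
  | [] => none
  | h :: t => if h ∈ os then some (0, h) else (firstHit os t).map (fun p => (p.1 + 1, p.2))

def fhMerge : Option (Nat × Char) → Option (Nat × Char) → Option (Nat × Char)
  | none, b => b
  | some a, none => some a
  | some a, some b => if b.1 < a.1 then some b else some a

def relFold (tail : List Char) : List Char → Option Char × Nat → Option Char × Nat
  | [], acc => acc
  | c :: rest, (best, bi) =>
    match firstHit [c] tail with
    | none => relFold tail rest (best, bi)
    | some (j, _) => if j < bi then relFold tail rest (some c, j) else relFold tail rest (best, bi)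

lemma firstHit_nil_os (tail : List Char) : firstHit [] tail = none := by
  induction tail with
  | nil => rfl
  | cons h t ih => simp [firstHit, ih]

lemma firstHit_lt_length (os tail : List Char) (j : Nat) (ch : Char)
    (h : firstHit os tail = some (j, ch)) : j < tail.length := by
  induction tail generalizing j with
  | nil => simp [firstHit] at h
  | cons hd t ih =>
    by_cases hm : hd ∈ os
    · simp [firstHit, hm] at h
      simp; omega
    · simp [firstHit, hm] at h
      obtain ⟨a, hab, ha⟩ := h
      have := ih a hab
      simp; omega

lemma firstHit_singleton_snd (c : Char) (tail : List Char) (j : Nat) (ch : Char)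
    (h : firstHit [c] tail = some (j, ch)) : ch = c := by
  induction tail generalizing j with
  | nil => simp [firstHit] at h
  | cons hd t ih =>
    by_cases hm : hd ∈ [c]
    · simp at hm
      simp [firstHit, hm] at h
      simp_all
    · simp [firstHit, hm] at h
      obtain ⟨a, hab, ha⟩ := h
      exact ih a hab

lemma firstHit_singleton_none_iff (c : Char) (tail : List Char) :
    firstHit [c] tail = none ↔ c ∉ tail := by
  induction tail with
  | nil => simp [firstHit]
  | cons hd t ih =>
    by_cases hm : hd = c
    · simp [firstHit, hm]
    · simp [firstHit, hm, Ne.symm hm, ih]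

lemma firstHit_singleton_of (c : Char) (tail : List Char) (n : Nat)
    (h1 : tail[n]? = some c) (h2 : ∀ i < n, tail[i]? ≠ some c) :
    firstHit [c] tail = some (n, c) := by
  induction tail generalizing n with
  | nil => simp at h1
  | cons hd t ih =>
    cases n with
    | zero =>
      simp at h1
      simp [firstHit, h1]
    | succ k =>
      have hne : hd ≠ c := by
        have := h2 0 (by omega)
        simpa using this
      have h1' : t[k]? = some c := by simpa using h1
      have h2' : ∀ i < k, t[i]? ≠ some c := by
        intro i hi
        have := h2 (i + 1) (by omega)
        simpa using this
      simp [firstHit, hne, ih k h1' h2']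

lemma singleton_prefix_drop (c : Char) (l : List Char) (n : Nat) :
    [c] <+: l.drop n ↔ l[n]? = some c := by
  rw [← List.head?_drop]
  constructor
  · intro ⟨t, ht⟩
    rw [← ht]; rfl
  · intro h
    cases hd : l.drop n with
    | nil => simp [hd] at h
    | cons x xs =>
      simp [hd] at h
      exact ⟨xs, by simp [h]⟩

lemma mem_infix_singleton (c : Char) (l : List Char) (h : c ∈ l) : [c] <:+: l := by
  obtain ⟨s, t, hst⟩ := List.append_of_mem h
  exact ⟨s, t, by simp [hst]⟩

lemma firstHit_singleton_mem (c : Char) (tail : List Char) (j : Nat) (ch : Char)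
    (h : firstHit [c] tail = some (j, ch)) : c ∈ tail := by
  by_contra hmem
  rw [(firstHit_singleton_none_iff c tail).mpr hmem] at h
  simp at h

lemma find_singleton_eq_firstHit (c : Char) (tail : List Char) (j : Nat) (ch : Char)
    (h : firstHit [c] tail = some (j, ch)) :
    PySem.Chars.find tail [c] = (j : Int) := by
  have hch : ch = c := firstHit_singleton_snd c tail j ch h
  have h : firstHit [c] tail = some (j, c) := hch ▸ h
  have hne : PySem.Chars.find tail [c] ≠ -1 := by
    rw [Ne, PySem.Chars.find_eq_neg_one_iff]
    intro hni
    exact hni (mem_infix_singleton c tail (firstHit_singleton_mem c tail j c h))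
  have hge : 0 ≤ PySem.Chars.find tail [c] := by
    have := PySem.Chars.neg_one_le_find tail [c]
    omega
  obtain ⟨hpre, hmin⟩ := PySem.Chars.find_spec hge
  have hat : tail[(PySem.Chars.find tail [c]).toNat]? = some c :=
    (singleton_prefix_drop c tail _).mp hpre
  have hfh : firstHit [c] tail = some ((PySem.Chars.find tail [c]).toNat, c) := by
    apply firstHit_singleton_of c tail _ hat
    intro i hi hcontra
    exact hmin i hi ((singleton_prefix_drop c tail i).mpr hcontra)
  rw [h] at hfh
  have hj : j = (PySem.Chars.find tail [c]).toNat := by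
    have := (Option.some.injEq _ _).mp hfh
    exact (Prod.mk.injEq _ _ _ _).mp this |>.1
  omega

lemma fhMerge_map_inc (a b : Option (Nat × Char)) :
    fhMerge (a.map (fun p => (p.1 + 1, p.2))) (b.map (fun p => (p.1 + 1, p.2)))
      = (fhMerge a b).map (fun p => (p.1 + 1, p.2)) := by
  cases a <;> cases b <;> simp [fhMerge] <;> split_ifs <;> simp_all

lemma firstHit_cons (c : Char) (rest tail : List Char) :
    firstHit (c :: rest) tail = fhMerge (firstHit [c] tail) (firstHit rest tail) := by
  induction tail with
  | nil => simp [firstHit, fhMerge]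
  | cons hd t ih =>
    by_cases h1 : hd = c
    · subst h1
      by_cases h2 : hd ∈ rest <;>
        simp [firstHit, h2, fhMerge] <;> cases hfh : firstHit rest t <;> simp [fhMerge]
    · by_cases h2 : hd ∈ rest
      · simp [firstHit, h1, h2, fhMerge]
        cases hfh : firstHit [c] t <;> simp [fhMerge]
      · simp [firstHit, h1, h2, ih, fhMerge_map_inc]

lemma relFold_spec (tail : List Char) :
    ∀ (os : List Char) (best : Option Char) (bi : Nat),
      relFold tail os (best, bi) =
        match firstHit os tail with
        | none => (best, bi)
        | some (j, ch) => if j < bi then (some ch, j) else (best, bi) := by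
  intro os
  induction os with
  | nil => intro best bi; simp [relFold, firstHit_nil_os]
  | cons c rest ih =>
    intro best bi
    rw [firstHit_cons]
    cases hc : firstHit [c] tail with
    | none => simp [relFold, hc, ih, fhMerge]
    | some p =>
      obtain ⟨j, ch⟩ := p
      have hch : ch = c := firstHit_singleton_snd c tail j ch hc
      subst hch
      by_cases hj : j < bi
      · simp only [relFold, hc, hj, if_true, ih]
        cases hr : firstHit rest tail with
        | none => simp [fhMerge, hj]
        | some q =>
          obtain ⟨j', ch'⟩ := q
          by_cases hlt : j' < j
          · simp [fhMerge, hlt] <;> omega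
          · simp [fhMerge, hlt, hj] <;> omega
      · simp only [relFold, hc, hj, if_false, ih]
        cases hr : firstHit rest tail with
        | none => simp [fhMerge, hj]
        | some q =>
          obtain ⟨j', ch'⟩ := q
          by_cases hlt : j' < j
          · simp [fhMerge, hlt]
          · simp [fhMerge, hlt, hj]
            omega

lemma bLoop_eq_relFold (text : String) (s : Nat) (hs : s ≤ text.toList.length) :
    ∀ (os : List Char) (best : Option Char) (bi : Nat),
      bLoop text (s : Int) os (best.map (fun c => String.ofList [c]), (s : Int) + (bi : Nat)) =
        ((relFold (text.toList.drop s) os (best, bi)).1.map (fun c => String.ofList [c]),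
         (s : Int) + ((relFold (text.toList.drop s) os (best, bi)).2 : Nat)) := by
  intro os
  induction os with
  | nil => intro best bi; simp [bLoop, relFold]
  | cons c rest ih =>
    intro best bi
    have hff : PySem.Str.findFrom text (String.ofList [c]) (s : Int) =
        if PySem.Chars.find (text.toList.drop s) [c] = -1 then -1
        else (s : Int) + PySem.Chars.find (text.toList.drop s) [c] := by
      rw [PySem.Str.findFrom_eq]
      have := PySem.Chars.findFrom_natCast text.toList (String.ofList [c]).toList s hs
      simpa using this
    cases hc : firstHit [c] (text.toList.drop s) with
    | none =>
      have hfind : PySem.Chars.find (text.toList.drop s) [c] = -1 := by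
        rw [PySem.Chars.find_eq_neg_one_iff]
        intro hinf
        have hmem : c ∈ text.toList.drop s := hinf.subset (by simp)
        exact (firstHit_singleton_none_iff c _).mp hc hmem
      simp only [bLoop, hff, hfind, if_true]
      have hcond : ¬ ((-1 : Int) ≠ -1 ∧ (-1 : Int) < (s : Int) + (bi : Nat)) := by simp
      simp only [hcond, if_false]
      rw [ih]
      simp [relFold, hc]
    | some p =>
      obtain ⟨j, ch⟩ := p
      have hch : ch = c := firstHit_singleton_snd c _ j ch hc
      have hc : firstHit [c] (text.toList.drop s) = some (j, c) := hch ▸ hc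
      have hfind : PySem.Chars.find (text.toList.drop s) [c] = (j : Int) :=
        find_singleton_eq_firstHit c _ j c hc
      have hne : PySem.Chars.find (text.toList.drop s) [c] ≠ -1 := by rw [hfind]; omega
      simp only [bLoop, hff, hfind]
      rw [if_neg (show ¬ ((j : Int) = -1) by omega)]
      by_cases hj : j < bi
      · rw [if_pos (show ((s : Int) + (j : Nat) ≠ -1 ∧ (s : Int) + (j : Nat) < (s : Int) + (bi : Nat)) by constructor <;> omega)]
        have := ih (some c) j
        simp only [Option.map_some] at this
        rw [this]
        simp [relFold, hc, hj]
      · rw [if_neg (show ¬ ((s : Int) + (j : Nat) ≠ -1 ∧ (s : Int) + (j : Nat) < (s : Int) + (bi : Nat)) by intro hx; omega)]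
        rw [ih]
        simp [relFold, hc, hj]

lemma isIn_singleton (a : Char) (l : List Char) :
    PySem.Chars.isIn [a] l = decide (a ∈ l) := by
  by_cases h : a ∈ l
  · simp [(PySem.Chars.isIn_iff_infix [a] l).mpr (mem_infix_singleton a l h), h]
  · have hni : ¬ [a] <:+: l := by
      intro hinf
      exact h (hinf.subset (by simp))
    simp [h]
    rw [← Bool.not_eq_true, PySem.Chars.isIn_iff_infix]
    exact hni

lemma find?_eq_firstHit (os tail : List Char) :
    tail.find? (fun c => PySem.Chars.isIn [c] os) = (firstHit os tail).map Prod.snd := by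
  induction tail with
  | nil => simp [firstHit]
  | cons hd t ih =>
    by_cases h : hd ∈ os
    · simp [List.find?, isIn_singleton, h, firstHit]
    · have hp : PySem.Chars.isIn [hd] os = false := by
        rw [isIn_singleton]; simpa using h
      simp only [List.find?, hp, firstHit, h, if_false]
      rw [ih]
      cases firstHit os t <;> simp


-- the index loop over range(start, len) equals List.find? on the dropped tail
lemma extractLoopA_eq (text options : String) :
    ∀ (n start : Nat), text.toList.length - start = n →
      extractLoopA text options (PySem.List.pyRange (start : Int) (PySem.Str.len text)) =
        ((text.toList.drop start).find? (fun c => PySem.Chars.isIn [c] options.toList)).map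
          (fun c => String.ofList [c]) := by
  intro n
  induction n with
  | zero =>
    intro start h
    have hle : text.toList.length ≤ start := by omega
    have hnil : PySem.List.pyRange (start : Int) (PySem.Str.len text) = [] := by
      apply PySem.List.pyRange_one_eq_nil
      simp [PySem.Str.len_eq]
      exact_mod_cast hle
    rw [hnil, List.drop_eq_nil_of_le hle]
    simp [extractLoopA]
  | succ n ih =>
    intro start h
    have hlt : start < text.toList.length := by omega
    have hcons : PySem.List.pyRange (start : Int) (PySem.Str.len text) =
        (start : Int) :: PySem.List.pyRange ((start : Int) + 1) (PySem.Str.len text) := by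
      apply PySem.List.pyRange_one_cons
      simp [PySem.Str.len_eq]
      exact_mod_cast hlt
    rw [hcons]
    have hget : PySem.Str.pyGet? text (start : Int) = some (text.toList[start]'hlt) := by
      rw [PySem.Str.pyGet?_natCast]
      exact List.getElem?_eq_getElem hlt
    have hdrop : text.toList.drop start = text.toList[start]'hlt :: text.toList.drop (start + 1) :=
      List.drop_eq_getElem_cons hlt
    have hcast : ((start : Int) + 1) = ((start + 1 : Nat) : Int) := by push_cast; ring
    simp only [extractLoopA, hget, hdrop, List.find?]
    have hin : PySem.Str.isIn (String.ofList [text.toList[start]'hlt]) options =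
        PySem.Chars.isIn [text.toList[start]'hlt] options.toList := by
      rw [PySem.Str.isIn_eq]; simp
    rw [hin]
    by_cases hc : PySem.Chars.isIn [text.toList[start]'hlt] options.toList = true
    · simp [hc]
    · simp only [Bool.not_eq_true] at hc
      rw [hcast, ih (start + 1) (by omega)]
      simp [hc]

-- ===== VERDICT (by name: the statement is the Claim_ definition above) =====
theorem extract_mc_answer_spec : Claim_equal_extract_mc_answer := by
  intro text options _
  unfold Spec_extract_mc_answer extract_mc_answer extract_mc_answer_alt
  simp only [PySem.Str.find_eq]
  set f := PySem.Chars.find text.toList "<start_of_turn>model".toList with hf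
  by_cases h : f = -1
  · simp [h]
  · have hpos : 0 ≤ f := by
      have := PySem.Chars.neg_one_le_find text.toList "<start_of_turn>model".toList
      rw [← hf] at this; omega
    have htag : ("<start_of_turn>model" : String).toList.length = 20 := by decide
    have hlen : PySem.Str.len ("<start_of_turn>model" : String) = 20 := by decide
    -- the tag was found as a prefix of text.drop f.toNat, so f.toNat + 20 ≤ |text|
    have hs : f.toNat + 20 ≤ text.toList.length := by
      obtain ⟨hpre, _⟩ := PySem.Chars.find_spec (s := text.toList)
        (sub := "<start_of_turn>model".toList) (by rw [← hf]; exact hpos)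
      have hple := hpre.length_le
      rw [htag, List.length_drop] at hple
      omega
    set s := f.toNat + 20 with hsdef
    have hcastA : f + PySem.Str.len ("<start_of_turn>model" : String) = ((s : Nat) : Int) := by
      rw [hlen]; omega
    simp only [h, if_false]
    rw [hcastA, extractLoopA_eq text options (text.toList.length - s) s rfl]
    have hlenText : PySem.Str.len text = (s : Int) + (((text.toList.drop s).length : Nat) : Int) := by
      rw [PySem.Str.len_eq, List.length_drop]
      omega
    rw [hlenText]
    have hB := bLoop_eq_relFold text s hs options.toList none (text.toList.drop s).length
    simp only [Option.map_none] at hB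
    rw [hB]
    rw [relFold_spec]
    rw [find?_eq_firstHit]
    cases hfh : firstHit options.toList (text.toList.drop s) with
    | none => simp
    | some p =>
      obtain ⟨j, ch⟩ := p
      have hjlt := firstHit_lt_length options.toList (text.toList.drop s) j ch hfh
      have hjlt2 : j < text.length - s := by simpa using hjlt
      simp [hjlt2]
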